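-- pv_equiv track=rewrite | github.com/6210qwe/leetcode_py | leetcode_solutions/by_id/q1000486.py | solution_function_name
-- ===== SOURCE A (Python) =====
-- from typing import List, Optional
--
-- class UnionFind:
--     def __init__(self, n):
--         self.parent = list(range(n))
--         self.rank = [0] * n
--
--     def find(self, x):
--         if self.parent[x] != x:
--             self.parent[x] = self.find(self.parent[x])
--         return self.parent[x]
--
--     def union(self, x, y):
--         root_x = self.find(x)
--         root_y = self.find(y)
--         if root_x != root_y:
--             if self.rank[root_x] > self.rank[root_y]:
--                 self.parent[root_y] = root_x
--             elif self.rank[root_x] < self.rank[root_y]: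
--                 self.parent[root_x] = root_y
--             else:
--                 self.parent[root_y] = root_x
--                 self.rank[root_x] += 1
--
-- def solution_function_name(shape: List[str]) -> int:
--     """
--     函数式接口 - 计算集水器的最终蓄水量
--     """
--     n, m = len(shape), len(shape[0])
--     uf = UnionFind(n * m + 1)  # 多一个虚拟节点表示边界
--     directions = [(0, 1), (1, 0)]
--
--     for i in range(n):
--         for j in range(m):
--             if shape[i][j] == '.':
--                 continue
--             for dx, dy in directions:
--                 ni, nj = i + dx, j + dy
--                 if 0 <= ni < n and 0 <= nj < m and shape[ni][nj] == shape[i][j]: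
--                     uf.union(i * m + j, ni * m + nj)
--
--     # 将边界上的 'l' 和 'r' 连接到虚拟节点
--     for i in range(n):
--         if shape[i][0] == 'l':
--             uf.union(i * m, n * m)
--         if shape[i][m - 1] == 'r':
--             uf.union(i * m + m - 1, n * m)
--     for j in range(m):
--         if shape[0][j] == 'l':
--             uf.union(j, n * m)
--         if shape[n - 1][j] == 'r':
--             uf.union((n - 1) * m + j, n * m)
--
--     water = 0
--     visited = set()
--     for i in range(n):
--         for j in range(m):
--             if shape[i][j] == '.':
--                 continue
--             root = uf.find(i * m + j)
--             if root not in visited and root != n * m: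
--                 visited.add(root)
--                 water += 2
--
--     return water
-- ===== SOURCE B (Python) =====
-- def _merge(label, a, b):
--     la, lb = label[a], label[b]
--     if la != lb:
--         label = [la if v == lb else v for v in label]
--     return label
--
--
-- def solution_function_name(shape):
--     n, m = len(shape), len(shape[0])
--     V = n * m  # one extra id standing for the outside
--     label = list(range(V + 1))
--     for i in range(n):
--         for j in range(m):
--             c = shape[i][j]
--             if c == '.':
--                 continue
--             if j + 1 < m and shape[i][j + 1] == c:
--                 label = _merge(label, i * m + j, i * m + j + 1)
--             if i + 1 < n and shape[i + 1][j] == c: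
--                 label = _merge(label, i * m + j, (i + 1) * m + j)
--     for i in range(n):
--         if shape[i][0] == 'l':
--             label = _merge(label, i * m, V)
--         if shape[i][m - 1] == 'r':
--             label = _merge(label, i * m + m - 1, V)
--     for j in range(m):
--         if shape[0][j] == 'l':
--             label = _merge(label, j, V)
--         if shape[n - 1][j] == 'r':
--             label = _merge(label, (n - 1) * m + j, V)
--     return 2 * len({label[i * m + j]
--                     for i in range(n) for j in range(m)
--                     if shape[i][j] != '.'})
-- ===== Notes on version B (the rewrite author's own statement) =====
-- stated objective: alternative
-- what changed: Replaces the path-compressed union-by-rank union-find (parent/rank forest, recursive find) with a flat label array whose classes are merged by rewriting one label into the other, and replaces the root/visited-set counting loop with a set comprehension over the cell labels; A's dead 'root != n*m' test disappears because a merged class's label is never the virtual id's own singleton label.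
import Mathlib
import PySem

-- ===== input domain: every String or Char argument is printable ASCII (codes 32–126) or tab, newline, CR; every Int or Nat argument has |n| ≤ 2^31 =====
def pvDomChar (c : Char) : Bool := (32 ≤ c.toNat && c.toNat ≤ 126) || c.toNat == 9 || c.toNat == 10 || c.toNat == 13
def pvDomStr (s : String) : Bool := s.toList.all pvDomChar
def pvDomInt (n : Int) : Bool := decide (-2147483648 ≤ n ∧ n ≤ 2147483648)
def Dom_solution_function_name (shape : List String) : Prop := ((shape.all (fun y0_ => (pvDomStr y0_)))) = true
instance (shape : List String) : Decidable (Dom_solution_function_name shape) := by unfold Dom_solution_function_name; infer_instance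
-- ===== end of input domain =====

-- B replaces A's path-compressed union-by-rank union-find with a flat label array merged by
-- relabeling and a set-comprehension count (objective: alternative structure, not speed).

-- ===== PORT A =====
-- shared input access: shape[i][j] (always in range under Pre_)
def chS (shape : List String) (i j : Nat) : Char := ((shape.getD i "").toList.getD j '.')

-- UnionFind.find with path compression (fuel is only a termination bound Python does not need)
def findA : Nat → List Nat → Nat → List Nat × Nat
  | 0, p, x => (p, x)
  | Nat.succ f, p, x =>
    let px := p.getD x x
    if px ≠ x then
      let pr := findA f p px
      (pr.1.set x pr.2, pr.2)
    else (p, x)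

-- UnionFind.union with union by rank; state = (parent, rank)
def unionA (st : List Nat × List Nat) (x y : Nat) : List Nat × List Nat :=
  let f := st.1.length
  let pr1 := findA f st.1 x
  let pr2 := findA f pr1.1 y
  let p := pr2.1
  let rx := pr1.2
  let ry := pr2.2
  let rk := st.2
  if rx ≠ ry then
    if rk.getD rx 0 > rk.getD ry 0 then (p.set ry rx, rk)
    else if rk.getD rx 0 < rk.getD ry 0 then (p.set rx ry, rk)
    else (p.set ry rx, rk.set rx (rk.getD rx 0 + 1))
  else (p, rk)

def solution_function_name (shape : List String) : Int :=
  let n := shape.length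
  let m := (shape.getD 0 "").length
  let st0 : List Nat × List Nat := (List.range (n*m+1), List.replicate (n*m+1) 0)
  let st1 := (List.range n).foldl (fun st i =>
    (List.range m).foldl (fun st j =>
      if chS shape i j = '.' then st
      else [(0,1),(1,0)].foldl (fun st (d : Nat × Nat) =>
        let ni := i + d.1
        let nj := j + d.2
        if ni < n ∧ nj < m ∧ chS shape ni nj = chS shape i j then
          unionA st (i*m+j) (ni*m+nj)
        else st) st) st) st0
  let st2 := (List.range n).foldl (fun st i =>
    let st := if chS shape i 0 = 'l' then unionA st (i*m) (n*m) else st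
    if chS shape i (m-1) = 'r' then unionA st (i*m+(m-1)) (n*m) else st) st1
  let st3 := (List.range m).foldl (fun st j =>
    let st := if chS shape 0 j = 'l' then unionA st j (n*m) else st
    if chS shape (n-1) j = 'r' then unionA st ((n-1)*m+j) (n*m) else st) st2
  let fin := (List.range n).foldl (fun acc i =>
    (List.range m).foldl (fun (acc : (List Nat × List Nat) × PySem.Set Nat × Int) j =>
      if chS shape i j = '.' then acc
      else
        let pr := findA acc.1.1.length acc.1.1 (i*m+j)
        if ¬ PySem.Set.contains acc.2.1 pr.2 ∧ pr.2 ≠ n*m then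
          ((pr.1, acc.1.2), (PySem.Set.add acc.2.1 pr.2, acc.2.2 + 2))
        else ((pr.1, acc.1.2), acc.2)) acc) (st3, (PySem.Set.empty, 0))
  fin.2.2

-- ===== PORT B =====
-- merge the classes of the two labels by rewriting every occurrence of the second label
def mergeB (lab : List Nat) (a b : Nat) : List Nat :=
  let la := lab.getD a 0
  let lb := lab.getD b 0
  if la ≠ lb then lab.map (fun v => if v = lb then la else v) else lab

def solution_function_name_alt (shape : List String) : Int :=
  let n := shape.length
  let m := (shape.getD 0 "").length
  let V := n*m
  let lab0 := List.range (V+1)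
  let lab1 := (List.range n).foldl (fun lab i =>
    (List.range m).foldl (fun lab j =>
      let c := chS shape i j
      if c = '.' then lab
      else
        let lab := if j+1 < m ∧ chS shape i (j+1) = c then mergeB lab (i*m+j) (i*m+(j+1)) else lab
        if i+1 < n ∧ chS shape (i+1) j = c then mergeB lab (i*m+j) ((i+1)*m+j) else lab) lab) lab0
  let lab2 := (List.range n).foldl (fun lab i =>
    let lab := if chS shape i 0 = 'l' then mergeB lab (i*m) V else lab
    if chS shape i (m-1) = 'r' then mergeB lab (i*m+(m-1)) V else lab) lab1
  let lab3 := (List.range m).foldl (fun lab j =>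
    let lab := if chS shape 0 j = 'l' then mergeB lab j V else lab
    if chS shape (n-1) j = 'r' then mergeB lab ((n-1)*m+j) V else lab) lab2
  2 * ((PySem.Set.ofList ((List.range n).flatMap (fun i =>
        ((List.range m).filter (fun j => chS shape i j ≠ '.')).map (fun j => lab3.getD (i*m+j) 0)))).length : Int)

-- ===== PRECONDITION & SPEC =====
-- Pre_ excludes exactly the inputs on which Python A raises IndexError: the empty list, an
-- empty first row, and a later row shorter than the first row (B raises there as well).
def Pre_solution_function_name (shape : List String) : Prop :=
  shape ≠ [] ∧ 1 ≤ (shape.headD "").toList.length ∧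
    ∀ s ∈ shape, (shape.headD "").toList.length ≤ s.toList.length
instance (shape : List String) : Decidable (Pre_solution_function_name shape) := by
  unfold Pre_solution_function_name; infer_instance
def pvWitness_solution_function_name : List String := (["ll", "rr"])
def Spec_solution_function_name (shape : List String) (out : Int) : Prop := out = solution_function_name_alt shape
instance (shape : List String) (out : Int) : Decidable (Spec_solution_function_name shape out) := by unfold Spec_solution_function_name; infer_instance

-- ===== CLAIM (what is proved, stated in full; the proofs are below) =====
def Claim_equal_solution_function_name : Prop := ∀ (shape : List String), Dom_solution_function_name shape → Pre_solution_function_name shape → Spec_solution_function_name shape (solution_function_name shape)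

-- ===== LEMMAS AND PROOFS =====

-- parent-chain relation: following parents from x for k steps reaches the root r
inductive ReachesN (p : List Nat) : Nat → Nat → Nat → Prop
  | root (x : Nat) : p.getD x x = x → ReachesN p 0 x x
  | step (k x r : Nat) : p.getD x x ≠ x → ReachesN p k (p.getD x x) r → ReachesN p (k+1) x r

theorem reach_root {p : List Nat} {k x r : Nat} (h : ReachesN p k x r) : p.getD r r = r := by
  induction h with
  | root _ hx => exact hx
  | step _ _ _ _ _ ih => exact ih

theorem reach_fun {p : List Nat} {k j x r s : Nat}
    (h1 : ReachesN p k x r) (h2 : ReachesN p j x s) : r = s := by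
  induction h1 generalizing j s with
  | root x hx =>
    cases h2 with
    | root _ _ => rfl
    | step _ _ _ hne _ => exact absurd hx hne
  | step k x r hne hr ih =>
    cases h2 with
    | root _ hx => exact absurd hx hne
    | step _ _ _ _ h2' => exact ih h2'

theorem getD_set_ne (p : List Nat) {x y : Nat} (v d : Nat) (h : x ≠ y) :
    (p.set x v).getD y d = p.getD y d := by
  simp [List.getD, List.getElem?_set_ne h]

theorem getD_set_self (p : List Nat) {x : Nat} (v d : Nat) (h : x < p.length) :
    (p.set x v).getD x d = v := by
  simp [List.getD, h]

theorem reach_lt {p : List Nat} {k x r : Nat}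
    (hcl : ∀ v, v < p.length → p.getD v v < p.length)
    (hx : x < p.length) (h : ReachesN p k x r) : r < p.length := by
  induction h with
  | root _ _ => exact hx
  | step _ y _ hne hr ih => exact ih (hcl _ hx)

-- path compression step preserves every reachability fact (shortening chains)
theorem reach_set_compress {p : List Nat} {x r : Nat}
    (hnx : p.getD x x ≠ x) (hroot : p.getD r r = r) (hx : ∃ k, ReachesN p k x r) :
    ∀ y j s, ReachesN p j y s → ∃ j' ≤ j, ReachesN (p.set x r) j' y s := by
  have hxlt : x < p.length := by
    by_contra hge
    exact hnx (by simp [List.getD, List.getElem?_eq_none (le_of_not_gt hge)])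
  have hrx : r ≠ x := by
    rintro rfl; exact hnx hroot
  intro y j s hj
  induction hj with
  | root z hz =>
    rcases eq_or_ne z x with heq | hne
    · subst heq; exact absurd hz hnx
    · exact ⟨0, le_refl _, ReachesN.root z (by rw [getD_set_ne p r z (fun h => hne h.symm)]; exact hz)⟩
  | step j z s hz hrest ih =>
    rcases eq_or_ne z x with heq | hne
    · subst heq
      obtain ⟨k0, hk0⟩ := hx
      have hs : s = r := reach_fun (ReachesN.step _ _ _ hz hrest) hk0
      subst hs
      have hpz : (p.set z s).getD z z = s := getD_set_self p s z hxlt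
      refine ⟨1, by omega, ReachesN.step 0 z s ?_ ?_⟩
      · rw [hpz]; exact hrx
      · rw [hpz]
        exact ReachesN.root s (by rw [getD_set_ne p s s (fun h => hrx h.symm)]; exact hroot)
    · obtain ⟨j2, hj2, hr2⟩ := ih
      refine ⟨j2 + 1, by omega, ReachesN.step j2 z s ?_ ?_⟩
      · rw [getD_set_ne p r z (fun h => hne h.symm)]; exact hz
      · rw [getD_set_ne p r z (fun h => hne h.symm)]; exact hr2

-- linking a root below another root remaps that root everywhere
theorem reach_set_root {p : List Nat} {rx ry : Nat}
    (hrx : p.getD rx rx = rx) (hry : p.getD ry ry = ry) (hne : rx ≠ ry) (hlt : ry < p.length) :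
    ∀ y j s, ReachesN p j y s → ∃ j' ≤ j + 1, ReachesN (p.set ry rx) j' y (if s = ry then rx else s) := by
  intro y j s hj
  induction hj with
  | root z hz =>
    rcases eq_or_ne z ry with heq | hne2
    · subst heq
      refine ⟨1, by omega, ?_⟩
      rw [if_pos rfl]
      have hpz : (p.set z rx).getD z z = rx := getD_set_self p rx z hlt
      refine ReachesN.step 0 z rx ?_ ?_
      · rw [hpz]; exact hne
      · rw [hpz]
        exact ReachesN.root rx (by rw [getD_set_ne p rx rx (fun h => hne h.symm)]; exact hrx)
    · refine ⟨0, by omega, ?_⟩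
      rw [if_neg hne2]
      exact ReachesN.root z (by rw [getD_set_ne p rx z (fun h => hne2 h.symm)]; exact hz)
  | step j z s hz hrest ih =>
    have hyne : z ≠ ry := by rintro rfl; exact hz hry
    obtain ⟨j2, hj2, hr2⟩ := ih
    refine ⟨j2 + 1, by omega, ReachesN.step j2 z _ ?_ ?_⟩
    · rw [getD_set_ne p rx z (fun h => hyne h.symm)]; exact hz
    · rw [getD_set_ne p rx z (fun h => hyne h.symm)]; exact hr2

-- the root as a total function (iterate the parent map length-many times)
def rootIt (p : List Nat) (x : Nat) : Nat := (fun y => p.getD y y)^[p.length] x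

theorem rootIt_eq {p : List Nat} {k x r : Nat} (h : ReachesN p k x r) (hk : k ≤ p.length) :
    rootIt p x = r := by
  have key : ∀ K, k ≤ K → (fun y => p.getD y y)^[K] x = r := by
    clear hk
    induction h with
    | root z hz =>
      intro K _
      induction K with
      | zero => rfl
      | succ K ihK => rw [Function.iterate_succ_apply', ihK (Nat.zero_le K)]; exact hz
    | step k z r hz hrest ih =>
      intro K hK
      match K, hK with
      | K + 1, _ =>
        rw [Function.iterate_succ_apply]
        exact ih K (by omega)
  exact key p.length hk

-- well-formedness: R is exactly the set of in-range roots and chains fit in the fuel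
def WFP (p : List Nat) : Prop :=
  (∀ v, v < p.length → p.getD v v < p.length) ∧
  ∃ R : List Nat, R.Nodup ∧ (∀ v, (v < p.length ∧ p.getD v v = v) ↔ v ∈ R) ∧
    (∀ x, x < p.length → ∃ k r, ReachesN p k x r ∧ k + R.length ≤ p.length)

theorem wfp_reach {p : List Nat} (h : WFP p) {x : Nat} (hx : x < p.length) :
    ∃ k, ReachesN p k x (rootIt p x) ∧ k < p.length := by
  obtain ⟨hcl, R, hnd, hchar, hch⟩ := h
  obtain ⟨k, r, hr, hb⟩ := hch x hx
  have hrR : r ∈ R := (hchar r).1 ⟨reach_lt hcl hx hr, reach_root hr⟩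
  have hRpos : 1 ≤ R.length := List.length_pos_of_mem hrR
  have hkl : k < p.length := by omega
  rw [rootIt_eq hr (by omega)]
  exact ⟨k, hr, hkl⟩

theorem wfp_root_lt {p : List Nat} (h : WFP p) {x : Nat} (hx : x < p.length) :
    rootIt p x < p.length := by
  obtain ⟨k, hr, _⟩ := wfp_reach h hx
  exact reach_lt h.1 hx hr

theorem wfp_root_fix {p : List Nat} (h : WFP p) {x : Nat} (hx : x < p.length) :
    p.getD (rootIt p x) (rootIt p x) = rootIt p x := by
  obtain ⟨k, hr, _⟩ := wfp_reach h hx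
  exact reach_root hr

-- workhorse: findA under a reachability certificate, arbitrary sufficient fuel
theorem findA_go {p : List Nat} {x r k : Nat} (hr : ReachesN p k x r)
    (hcl : ∀ v, v < p.length → p.getD v v < p.length) (hx : x < p.length) :
    ∀ f, k < f →
    (findA f p x).2 = r ∧
    (findA f p x).1.length = p.length ∧
    (∀ v, ((findA f p x).1.getD v v = v ↔ p.getD v v = v)) ∧
    (∀ y j s, ReachesN p j y s → ∃ j' ≤ j, ReachesN (findA f p x).1 j' y s) ∧
    (∀ v, v < p.length → (findA f p x).1.getD v v < p.length) := by
  induction hr with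
  | root z hz =>
    intro f hf
    match f, hf with
    | f + 1, _ =>
      have hres : findA (f + 1) p z = (p, z) := by
        simp only [findA]
        rw [if_neg (not_not_intro hz)]
      rw [hres]
      exact ⟨rfl, rfl, fun v => Iff.rfl, fun y j s hj => ⟨j, le_refl _, hj⟩, hcl⟩
  | step k z r hz hrest ih =>
    intro f hf
    match f, hf with
    | f + 1, _ =>
      have hzr : r ≠ z := by
        rintro rfl
        exact hz (reach_root (ReachesN.step _ _ _ hz hrest))
      have hpzl : p.getD z z < p.length := hcl z hx
      obtain ⟨h2, hlen, hiff, hpres, hcl1⟩ := ih hpzl f (by omega)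
      have hres : findA (f + 1) p z = ((findA f p (p.getD z z)).1.set z r, r) := by
        simp only [findA]
        rw [if_pos hz, h2]
      rw [hres]
      set p1 := (findA f p (p.getD z z)).1 with hp1
      have hzlen1 : z < p1.length := by rw [hlen]; exact hx
      have hnx1 : p1.getD z z ≠ z := by
        intro hcontra; exact hz ((hiff z).1 hcontra)
      have hroot1 : p1.getD r r = r :=
        (hiff r).2 (reach_root (ReachesN.step _ _ _ hz hrest))
      have hreach1 : ∃ k', ReachesN p1 k' z r := by
        obtain ⟨j', _, hj'⟩ := hpres z (k + 1) r (ReachesN.step _ _ _ hz hrest)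
        exact ⟨j', hj'⟩
      refine ⟨rfl, by rw [List.length_set]; exact hlen, ?_, ?_, ?_⟩
      · intro v
        rcases eq_or_ne v z with rfl | hne
        · rw [getD_set_self p1 r v hzlen1]
          constructor
          · intro hc; exact absurd hc hzr
          · intro hc; exact absurd hc hz
        · rw [getD_set_ne p1 r v (fun h => hne h.symm)]
          exact hiff v
      · intro y j s hj
        obtain ⟨j1, hj1, hd1⟩ := hpres y j s hj
        obtain ⟨j2, hj2, hd2⟩ := reach_set_compress hnx1 hroot1 hreach1 y j1 s hd1
        exact ⟨j2, by omega, hd2⟩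
      · intro v hv
        rcases eq_or_ne v z with rfl | hne
        · rw [getD_set_self p1 r v hzlen1]
          exact reach_lt hcl hx (ReachesN.step _ _ _ hz hrest)
        · rw [getD_set_ne p1 r v (fun h => hne h.symm)]
          exact hcl1 v hv

-- full specification of findA under WFP
theorem findA_spec {p : List Nat} (h : WFP p) {x : Nat} (hx : x < p.length) :
    (findA p.length p x).2 = rootIt p x ∧
    (findA p.length p x).1.length = p.length ∧
    WFP (findA p.length p x).1 ∧
    (∀ u, u < p.length → rootIt (findA p.length p x).1 u = rootIt p u) := by
  obtain ⟨k, hr, hk⟩ := wfp_reach h hx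
  obtain ⟨h2, hlen, hiff, hpres, hcl1⟩ := findA_go hr h.1 hx p.length hk
  obtain ⟨hcl, R, hnd, hchar, hch⟩ := h
  have hwf1 : WFP (findA p.length p x).1 := by
    refine ⟨by rw [hlen]; exact hcl1, R, hnd, ?_, ?_⟩
    · intro v
      rw [hlen, hiff v]
      exact hchar v
    · intro u hu
      obtain ⟨j, r', hj, hb⟩ := hch u (by rw [hlen] at hu; exact hu)
      obtain ⟨j', hj', hd'⟩ := hpres u j r' hj
      exact ⟨j', r', hd', by omega⟩
  refine ⟨by rw [h2, rootIt_eq hr (by omega)], hlen, hwf1, ?_⟩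
  intro u hu
  obtain ⟨j, hj, hjl⟩ := wfp_reach ⟨hcl, R, hnd, hchar, hch⟩ hu
  obtain ⟨j', hj', hd'⟩ := hpres u j _ hj
  rw [rootIt_eq hj (by omega)]
  exact rootIt_eq hd' (by rw [hlen]; omega)

-- full specification of unionA under WFP
theorem unionA_spec {p rk : List Nat} (h : WFP p) {x y vn : Nat}
    (hN : p.length = vn + 1) (hx : x < p.length) (hy : y < p.length)
    (hxv : rootIt p x ≠ vn) (hyv : rootIt p y = vn → rk.getD vn 0 = 0) :
    (unionA (p, rk) x y).1.length = p.length ∧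
    WFP (unionA (p, rk) x y).1 ∧
    (unionA (p, rk) x y).2.getD vn 0 = rk.getD vn 0 ∧
    ((rootIt p x = rootIt p y ∧ ∀ u, u < p.length → rootIt (unionA (p, rk) x y).1 u = rootIt p u) ∨
     (rootIt p x ≠ rootIt p y ∧ ∃ surv chld,
        ((surv = rootIt p x ∧ chld = rootIt p y) ∨ (surv = rootIt p y ∧ chld = rootIt p x)) ∧
        surv ≠ vn ∧
        ∀ u, u < p.length → rootIt (unionA (p, rk) x y).1 u =
          (if rootIt p u = chld then surv else rootIt p u))) := by
  obtain ⟨hfx2, hflen1, hwf1, hfrt1⟩ := findA_spec h hx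
  set p1 := (findA p.length p x).1 with hp1
  have hfuel : p1.length = p.length := hflen1
  have hy1 : y < p1.length := by rw [hfuel]; exact hy
  obtain ⟨hfy2, hflen2, hwf2, hfrt2⟩ := findA_spec hwf1 hy1
  rw [hfuel] at hfy2 hflen2 hwf2 hfrt2
  set p2 := (findA p.length p1 y).1 with hp2
  have hu : unionA (p, rk) x y =
      (if (findA p.length p x).2 ≠ (findA p.length p1 y).2 then
        (if rk.getD (findA p.length p x).2 0 > rk.getD (findA p.length p1 y).2 0 then
          (p2.set (findA p.length p1 y).2 (findA p.length p x).2, rk)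
        else if rk.getD (findA p.length p x).2 0 < rk.getD (findA p.length p1 y).2 0 then
          (p2.set (findA p.length p x).2 (findA p.length p1 y).2, rk)
        else (p2.set (findA p.length p1 y).2 (findA p.length p x).2,
              rk.set (findA p.length p x).2 (rk.getD (findA p.length p x).2 0 + 1)))
      else (p2, rk)) := rfl
  have hrxv : (findA p.length p x).2 = rootIt p x := hfx2
  have hryv : (findA p.length p1 y).2 = rootIt p y := by
    rw [hfy2]; exact hfrt1 y hy
  have hlen2 : p2.length = p.length := hflen2
  have hrt2 : ∀ u, u < p.length → rootIt p2 u = rootIt p u := by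
    intro u hu2
    rw [hfrt2 u hu2, hfrt1 u hu2]
  rcases eq_or_ne (rootIt p x) (rootIt p y) with heq | hne
  · have hcond : ¬ ((findA p.length p x).2 ≠ (findA p.length p1 y).2) := by
      rw [hrxv, hryv]; exact not_not_intro heq
    rw [hu, if_neg hcond]
    exact ⟨hlen2, hwf2, rfl, Or.inl ⟨heq, hrt2⟩⟩
  · have hcond : (findA p.length p x).2 ≠ (findA p.length p1 y).2 := by
      rw [hrxv, hryv]; exact hne
    -- generic: linking root chld below root surv remaps chld to surv everywhere
    have key : ∀ surv chld : Nat,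
        ((surv = rootIt p x ∧ chld = rootIt p y) ∨ (surv = rootIt p y ∧ chld = rootIt p x)) →
        (p2.set chld surv).length = p.length ∧ WFP (p2.set chld surv) ∧
        (∀ u, u < p.length → rootIt (p2.set chld surv) u =
          (if rootIt p u = chld then surv else rootIt p u)) := by
      intro surv chld hsc
      have hsurv_lt : surv < p.length := by
        rcases hsc with ⟨hs, _⟩ | ⟨hs, _⟩
        · rw [hs]; exact wfp_root_lt h hx
        · rw [hs]; exact wfp_root_lt h hy
      have hchld_lt : chld < p.length := by
        rcases hsc with ⟨_, hc⟩ | ⟨_, hc⟩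
        · rw [hc]; exact wfp_root_lt h hy
        · rw [hc]; exact wfp_root_lt h hx
      have hscne : surv ≠ chld := by
        rcases hsc with ⟨hs, hc⟩ | ⟨hs, hc⟩ <;> rw [hs, hc]
        · exact hne
        · exact hne.symm
      have hsr : p2.getD surv surv = surv := by
        rcases hsc with ⟨hs, _⟩ | ⟨hs, _⟩ <;> rw [hs]
        · rw [← hrt2 x hx]; exact wfp_root_fix hwf2 (by rw [hlen2]; exact hx)
        · rw [← hrt2 y hy]; exact wfp_root_fix hwf2 (by rw [hlen2]; exact hy)
      have hcr : p2.getD chld chld = chld := by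
        rcases hsc with ⟨_, hc⟩ | ⟨_, hc⟩ <;> rw [hc]
        · rw [← hrt2 y hy]; exact wfp_root_fix hwf2 (by rw [hlen2]; exact hy)
        · rw [← hrt2 x hx]; exact wfp_root_fix hwf2 (by rw [hlen2]; exact hx)
      have hclt2 : chld < p2.length := by rw [hlen2]; exact hchld_lt
      have hslt2 : surv < p2.length := by rw [hlen2]; exact hsurv_lt
      have hpres := reach_set_root hsr hcr hscne hclt2
      obtain ⟨hcl2, R2, hnd2, hchar2, hch2⟩ := hwf2
      have hcR : chld ∈ R2 := (hchar2 chld).1 ⟨hclt2, hcr⟩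
      have hR2pos : 1 ≤ R2.length := List.length_pos_of_mem hcR
      have hlen' : (p2.set chld surv).length = p.length := by
        rw [List.length_set]; exact hlen2
      refine ⟨hlen', ⟨?_, R2.erase chld, hnd2.erase chld, ?_, ?_⟩, ?_⟩
      · intro v hv
        rw [List.length_set] at hv ⊢
        rcases eq_or_ne v chld with rfl | hvne
        · rw [getD_set_self p2 surv v hclt2]; exact hslt2
        · rw [getD_set_ne p2 surv v (fun hh => hvne hh.symm)]
          exact hcl2 v hv
      · intro v
        rw [List.length_set]
        rcases eq_or_ne v chld with rfl | hvne
        · constructor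
          · rintro ⟨hv1, hv2⟩
            rw [getD_set_self p2 surv v hclt2] at hv2
            exact absurd hv2 hscne
          · intro hmem
            exact absurd ((List.Nodup.mem_erase_iff hnd2).1 hmem).1 (by simp)
        · rw [getD_set_ne p2 surv v (fun hh => hvne hh.symm)]
          rw [List.Nodup.mem_erase_iff hnd2]
          constructor
          · intro hv; exact ⟨hvne, (hchar2 v).1 hv⟩
          · rintro ⟨_, hv⟩; exact (hchar2 v).2 hv
      · intro u hu2
        rw [List.length_set] at hu2
        obtain ⟨k, r, hr, hb⟩ := hch2 u hu2
        obtain ⟨k', hk', hr'⟩ := hpres u k r hr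
        refine ⟨k', _, hr', ?_⟩
        rw [List.length_set, List.length_erase_of_mem hcR]
        omega
      · intro u hu2
        have hu2' : u < p2.length := by rw [hlen2]; exact hu2
        obtain ⟨k, r, hr, hb⟩ := hch2 u hu2'
        obtain ⟨k', hk', hr'⟩ := hpres u k r hr
        have hru : rootIt p2 u = r := rootIt_eq hr (by omega)
        have hset : rootIt (p2.set chld surv) u = (if r = chld then surv else r) := by
          apply rootIt_eq hr'
          rw [List.length_set]
          omega
        rw [hset, ← hru, hrt2 u hu2]
    rw [hu, if_pos hcond]
    by_cases hgt : rk.getD (findA p.length p x).2 0 > rk.getD (findA p.length p1 y).2 0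
    · rw [if_pos hgt, hrxv, hryv]
      obtain ⟨hl', hwf', hrt'⟩ := key (rootIt p x) (rootIt p y) (Or.inl ⟨rfl, rfl⟩)
      exact ⟨hl', hwf', rfl, Or.inr ⟨hne, rootIt p x, rootIt p y, Or.inl ⟨rfl, rfl⟩, hxv, hrt'⟩⟩
    · rw [if_neg hgt]
      by_cases hlt : rk.getD (findA p.length p x).2 0 < rk.getD (findA p.length p1 y).2 0
      · rw [if_pos hlt, hrxv, hryv]
        obtain ⟨hl', hwf', hrt'⟩ := key (rootIt p y) (rootIt p x) (Or.inr ⟨rfl, rfl⟩)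
        have hyvn : rootIt p y ≠ vn := by
          intro hcon
          rw [hrxv, hryv, hcon, hyv hcon] at hlt
          omega
        exact ⟨hl', hwf', rfl, Or.inr ⟨hne, rootIt p y, rootIt p x, Or.inr ⟨rfl, rfl⟩, hyvn, hrt'⟩⟩
      · rw [if_neg hlt, hrxv, hryv]
        obtain ⟨hl', hwf', hrt'⟩ := key (rootIt p x) (rootIt p y) (Or.inl ⟨rfl, rfl⟩)
        exact ⟨hl', hwf', getD_set_ne rk _ 0 hxv,
          Or.inr ⟨hne, rootIt p x, rootIt p y, Or.inl ⟨rfl, rfl⟩, hxv, hrt'⟩⟩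

-- the combined invariant tying A's union-find state to B's label array
def GInv (vn : Nat) (st : List Nat × List Nat) (lab : List Nat) : Prop :=
  st.1.length = vn + 1 ∧ lab.length = vn + 1 ∧ WFP st.1 ∧
  (∀ x y, x < vn + 1 → y < vn + 1 →
    (rootIt st.1 x = rootIt st.1 y ↔ lab.getD x 0 = lab.getD y 0)) ∧
  (∀ x, x < vn → rootIt st.1 x ≠ vn) ∧
  st.2.getD vn 0 = 0

-- collapsing one value onto another is the same equivalence-coarsening on both sides
theorem collapse_iff (a b u w : Nat) (_hne : a ≠ b) :
    ((if u = b then a else u) = (if w = b then a else w)) ↔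
      (u = w ∨ ((u = a ∨ u = b) ∧ (w = a ∨ w = b))) := by
  split_ifs with h1 h2 h2 <;> omega

-- one parallel step: A's union and B's merge on the same pair preserve GInv
set_option maxHeartbeats 1000000 in
theorem union_merge_step {vn : Nat} {st : List Nat × List Nat} {lab : List Nat} {x y : Nat}
    (h : GInv vn st lab) (hx : x < vn) (hy : y ≤ vn) :
    GInv vn (unionA st x y) (mergeB lab x y) := by
  obtain ⟨p, rk⟩ := st
  obtain ⟨hplen, hllen, hwf, hLR, hNV, hRK⟩ := h
  simp only at hplen hLR hNV hRK ⊢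
  have hxN : x < vn + 1 := by omega
  have hyN : y < vn + 1 := by omega
  have hx' : x < p.length := by rw [hplen]; exact hxN
  have hy' : y < p.length := by rw [hplen]; exact hyN
  have hxv : rootIt p x ≠ vn := hNV x hx
  obtain ⟨hl', hwf', hrk', hcases⟩ :=
    unionA_spec hwf hplen hx' hy' hxv (fun _ => hRK)
  have hlab_iff := hLR x y hxN hyN
  rcases hcases with ⟨heq, hpres⟩ | ⟨hne, surv, chld, hsc, hsvn, hrt'⟩
  · -- roots already equal: labels already equal, nothing changes on either side
    have hm : mergeB lab x y = lab := by
      unfold mergeB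
      rw [if_neg (not_not_intro (hlab_iff.1 heq))]
    rw [hm]
    refine ⟨by rw [hl']; exact hplen, hllen, hwf', ?_, ?_, by rw [hrk']; exact hRK⟩
    · intro u w huN hwN
      rw [hpres u (by rw [hplen]; exact huN), hpres w (by rw [hplen]; exact hwN)]
      exact hLR u w huN hwN
    · intro u hu2
      rw [hpres u (by rw [hplen]; omega)]
      exact hNV u hu2
  · -- the two classes merge on both sides
    have hlane : lab.getD x 0 ≠ lab.getD y 0 := fun hc => hne (hlab_iff.2 hc)
    have hm : mergeB lab x y =
        lab.map (fun v => if v = lab.getD y 0 then lab.getD x 0 else v) := by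
      unfold mergeB
      rw [if_pos hlane]
    have hrtN : ∀ u, u < vn + 1 → rootIt (unionA (p, rk) x y).1 u =
        (if rootIt p u = chld then surv else rootIt p u) := by
      intro u huN; exact hrt' u (by rw [hplen]; exact huN)
    rw [hm]
    have hmaplen : (lab.map (fun v => if v = lab.getD y 0 then lab.getD x 0 else v)).length
        = vn + 1 := by rw [List.length_map]; exact hllen
    have hgetm : ∀ u, u < vn + 1 →
        (lab.map (fun v => if v = lab.getD y 0 then lab.getD x 0 else v)).getD u 0 =
        (if lab.getD u 0 = lab.getD y 0 then lab.getD x 0 else lab.getD u 0) := by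
      intro u huN
      have hul : u < lab.length := by rw [hllen]; exact huN
      rw [List.getD_eq_getElem?_getD, List.getElem?_map,
        List.getElem?_eq_getElem hul]
      simp [List.getD_eq_getElem?_getD, List.getElem?_eq_getElem hul]
    have hscne : surv ≠ chld := by
      rcases hsc with ⟨hs, hc⟩ | ⟨hs, hc⟩ <;> rw [hs, hc]
      · exact hne
      · exact hne.symm
    have hmem_iff : ∀ u, u < vn + 1 →
        ((rootIt p u = surv ∨ rootIt p u = chld) ↔
         (lab.getD u 0 = lab.getD x 0 ∨ lab.getD u 0 = lab.getD y 0)) := by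
      intro u huN
      have h1 := hLR u x huN hxN
      have h2 := hLR u y huN hyN
      rcases hsc with ⟨hs, hc⟩ | ⟨hs, hc⟩ <;> rw [hs, hc]
      · exact or_congr h1 h2
      · exact (or_congr h2 h1).trans or_comm
    refine ⟨by rw [hl']; exact hplen, hmaplen, hwf', ?_, ?_, by rw [hrk']; exact hRK⟩
    · intro u w huN hwN
      rw [hrtN u huN, hrtN w hwN, hgetm u huN, hgetm w hwN]
      have hcol1 := collapse_iff surv chld (rootIt p u) (rootIt p w) hscne
      have hcol2 := collapse_iff (lab.getD x 0) (lab.getD y 0)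
        (lab.getD u 0) (lab.getD w 0) hlane
      rw [hcol1, hcol2]
      have huw := hLR u w huN hwN
      have hmu := hmem_iff u huN
      have hmw := hmem_iff w hwN
      rw [huw, hmu, hmw]
    · intro u hu2
      rw [hrtN u (by omega)]
      split_ifs with hcc
      · exact hsvn
      · exact hNV u hu2

-- parallel fold: a pointwise-preserved relation is preserved by equal-length folds
theorem fold_par {α β γ : Type} (P : α → β → Prop) (fA : α → γ → α) (fB : β → γ → β)
    (L : List γ) (hstep : ∀ a b i, i ∈ L → P a b → P (fA a i) (fB b i)) :
    ∀ a b, P a b → P (L.foldl fA a) (L.foldl fB b) := by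
  induction L with
  | nil => intro a b hp; exact hp
  | cons i L ih =>
    intro a b hp
    exact ih (fun a b i' hi' => hstep a b i' (List.mem_cons_of_mem _ hi')) _ _
      (hstep a b i (List.mem_cons_self) hp)

-- a grid cell's flat index is below the virtual node
theorem cell_lt {i j n m : Nat} (hi : i < n) (hj : j < m) : i * m + j < n * m :=
  calc i * m + j < i * m + m := by omega
    _ = (i + 1) * m := by ring
    _ ≤ n * m := Nat.mul_le_mul_right m (by omega)

-- the initial state satisfies the invariant
theorem ginv_init (vn : Nat) :
    GInv vn (List.range (vn+1), List.replicate (vn+1) 0) (List.range (vn+1)) := by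
  have hgetD : ∀ v : Nat, (List.range (vn+1)).getD v v = v := by
    intro v
    rcases lt_or_ge v (vn+1) with hv | hv
    · simp [List.getD, hv]
    · rw [List.getD_eq_getElem?_getD,
        List.getElem?_eq_none (l := List.range (vn+1)) (by simpa using hv)]
      rfl
  have hroot : ∀ x : Nat, rootIt (List.range (vn+1)) x = x := by
    intro x
    exact rootIt_eq (ReachesN.root x (hgetD x)) (Nat.zero_le _)
  refine ⟨by simp, by simp, ⟨?_, List.range (vn+1), List.nodup_range, ?_, ?_⟩, ?_, ?_, ?_⟩
  · intro v hv; rw [hgetD v]; simpa using hv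
  · intro v
    rw [List.length_range, List.mem_range, hgetD v]
    simp
  · intro x hx
    exact ⟨0, x, ReachesN.root x (hgetD x), by simp⟩
  · intro x y hx hy
    rw [hroot x, hroot y]
    have hgx : (List.range (vn+1)).getD x 0 = x := by
      simp [List.getD, show x < vn+1 from hx]
    have hgy : (List.range (vn+1)).getD y 0 = y := by
      simp [List.getD, show y < vn+1 from hy]
    rw [hgx, hgy]
  · intro x hx
    rw [hroot x]; omega
  · simp [List.getD]

-- A's counting step on one non-empty cell
def cellStepA (vn : Nat) (acc : (List Nat × List Nat) × PySem.Set Nat × Int) (c : Nat) :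
    (List Nat × List Nat) × PySem.Set Nat × Int :=
  let pr := findA acc.1.1.length acc.1.1 c
  if ¬ PySem.Set.contains acc.2.1 pr.2 ∧ pr.2 ≠ vn then
    ((pr.1, acc.1.2), (PySem.Set.add acc.2.1 pr.2, acc.2.2 + 2))
  else ((pr.1, acc.1.2), acc.2)

-- A's counting loop computes twice the number of distinct labels of the processed cells
set_option maxHeartbeats 1000000 in
theorem count_fold (vn : Nat) (lab : List Nat) :
    ∀ (cells pc : List Nat) (st : List Nat × List Nat) (vis : PySem.Set Nat) (w : Int),
    (∀ c ∈ cells, c < vn) → (∀ c ∈ pc, c < vn) →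
    GInv vn st lab →
    (∀ t, t ∈ vis ↔ ∃ c ∈ pc, rootIt st.1 c = t) →
    w = 2 * ((PySem.Set.ofList (pc.map (fun c => lab.getD c 0))).length : Int) →
    (cells.foldl (cellStepA vn) (st, (vis, w))).2.2 =
      2 * ((PySem.Set.ofList ((pc ++ cells).map (fun c => lab.getD c 0))).length : Int) := by
  intro cells
  induction cells with
  | nil =>
    intro pc st vis w _ _ _ _ hw
    simpa using hw
  | cons c cs ih =>
    intro pc st vis w hcells hpc hG hvis hw
    obtain ⟨hplen, hllen, hwf, hLR, hNV, hRK⟩ := hG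
    have hcvn : c < vn := hcells c List.mem_cons_self
    have hcN : c < st.1.length := by rw [hplen]; omega
    obtain ⟨hf2, hflen, hfwf, hfrt⟩ := findA_spec hwf hcN
    have hrvn : rootIt st.1 c ≠ vn := hNV c hcvn
    have hG' : GInv vn ((findA st.1.length st.1 c).1, st.2) lab := by
      refine ⟨by rw [hflen]; exact hplen, hllen, hfwf, ?_, ?_, hRK⟩
      · intro u w' huN hwN
        rw [hfrt u (by rw [hplen]; exact huN), hfrt w' (by rw [hplen]; exact hwN)]
        exact hLR u w' huN hwN
      · intro u hu2
        rw [hfrt u (by rw [hplen]; omega)]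
        exact hNV u hu2
    have hpc' : ∀ c' ∈ pc ++ [c], c' < vn := by
      intro c' hc'
      rcases List.mem_append.1 hc' with hh | hh
      · exact hpc c' hh
      · rw [List.mem_singleton.1 hh]; exact hcvn
    have hfrt' : ∀ c', c' < vn → rootIt (findA st.1.length st.1 c).1 c' = rootIt st.1 c' :=
      fun c' hc' => hfrt c' (by rw [hplen]; omega)
    rw [List.foldl_cons]
    by_cases hmem : rootIt st.1 c ∈ vis
    · -- this component was already counted
      have hstep : cellStepA vn (st, (vis, w)) c = (((findA st.1.length st.1 c).1, st.2), (vis, w)) := by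
        unfold cellStepA
        rw [if_neg]
        intro hcon
        exact hcon.1 (by rw [hf2]; exact (PySem.Set.contains_iff _ _).2 hmem)
      rw [hstep]
      have hres := ih (pc ++ [c]) ((findA st.1.length st.1 c).1, st.2) vis w
        (fun c' hc' => hcells c' (List.mem_cons_of_mem _ hc')) hpc' hG'
        (by
          intro t
          rw [hvis t]
          constructor
          · rintro ⟨c', hc', hr⟩
            exact ⟨c', List.mem_append_left _ hc', by rw [hfrt' c' (hpc c' hc')]; exact hr⟩
          · rintro ⟨c', hc', hr⟩
            rcases List.mem_append.1 hc' with hh | hh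
            · exact ⟨c', hh, by rw [hfrt' c' (hpc c' hh)] at hr; exact hr⟩
            · rw [List.mem_singleton.1 hh] at hr
              rw [hfrt' c hcvn] at hr
              rw [← hr]
              exact (hvis (rootIt st.1 c)).1 hmem)
        (by
          rw [List.map_append, List.map_singleton, PySem.Set.ofList_append_singleton,
            PySem.Set.add_of_mem]
          · exact hw
          · rw [PySem.Set.mem_ofList]
            obtain ⟨c', hc', hr⟩ := (hvis (rootIt st.1 c)).1 hmem
            have : lab.getD c' 0 = lab.getD c 0 :=
              (hLR c' c (by have := hpc c' hc'; omega) (by omega)).1 hr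
            exact List.mem_map.2 ⟨c', hc', this⟩)
      rw [hres]
      simp
    · -- a new component: count it
      have hstep : cellStepA vn (st, (vis, w)) c =
          (((findA st.1.length st.1 c).1, st.2),
            (PySem.Set.add vis (rootIt st.1 c), w + 2)) := by
        unfold cellStepA
        rw [if_pos]
        · rw [hf2]
        · constructor
          · rw [hf2]
            intro hcon
            exact hmem ((PySem.Set.contains_iff _ _).1 hcon)
          · rw [hf2]; exact hrvn
      rw [hstep]
      have hlabnot : lab.getD c 0 ∉ PySem.Set.ofList (pc.map (fun c' => lab.getD c' 0)) := by
        rw [PySem.Set.mem_ofList]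
        intro hcon
        obtain ⟨c', hc', heq⟩ := List.mem_map.1 hcon
        have hr : rootIt st.1 c' = rootIt st.1 c :=
          (hLR c' c (by have := hpc c' hc'; omega) (by omega)).2 heq
        exact hmem ((hvis (rootIt st.1 c)).2 ⟨c', hc', hr⟩)
      have hres := ih (pc ++ [c]) ((findA st.1.length st.1 c).1, st.2)
        (PySem.Set.add vis (rootIt st.1 c)) (w + 2)
        (fun c' hc' => hcells c' (List.mem_cons_of_mem _ hc')) hpc' hG'
        (by
          intro t
          rw [PySem.Set.mem_add]
          constructor
          · rintro (hh | hh)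
            · obtain ⟨c', hc', hr⟩ := (hvis t).1 hh
              exact ⟨c', List.mem_append_left _ hc', by rw [hfrt' c' (hpc c' hc')]; exact hr⟩
            · exact ⟨c, List.mem_append_right _ (List.mem_singleton.2 rfl),
                by rw [hfrt' c hcvn]; exact hh.symm⟩
          · rintro ⟨c', hc', hr⟩
            rcases List.mem_append.1 hc' with hh | hh
            · exact Or.inl ((hvis t).2 ⟨c', hh, by rw [hfrt' c' (hpc c' hh)] at hr; exact hr⟩)
            · rw [List.mem_singleton.1 hh] at hr
              rw [hfrt' c hcvn] at hr
              exact Or.inr hr.symm)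
        (by
          rw [List.map_append, List.map_singleton, PySem.Set.ofList_append_singleton,
            PySem.Set.add_of_not_mem hlabnot, List.length_append, List.length_singleton]
          rw [hw]
          push_cast
          ring)
      rw [hres]
      simp

-- the counting phase, for any state satisfying the invariant
set_option maxHeartbeats 1000000 in
theorem final_count (shape : List String) (n m : Nat)
    (st3 : List Nat × List Nat) (lab3 : List Nat) (hG : GInv (n*m) st3 lab3) :
    ((List.range n).foldl (fun acc i =>
      (List.range m).foldl (fun acc j =>
        if chS shape i j = '.' then acc else cellStepA (n*m) acc (i*m+j)) acc)
      (st3, (PySem.Set.empty, 0))).2.2 =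
    2 * ((PySem.Set.ofList ((List.range n).flatMap (fun i =>
        ((List.range m).filter (fun j => chS shape i j ≠ '.')).map
          (fun j => lab3.getD (i*m+j) 0)))).length : Int) := by
  have hfun : ∀ i : Nat, (fun (acc : (List Nat × List Nat) × PySem.Set Nat × Int) (j : Nat) =>
        if chS shape i j = '.' then acc else cellStepA (n*m) acc (i*m+j)) =
      (fun acc j => if decide (chS shape i j ≠ '.') = true then cellStepA (n*m) acc (i*m+j) else acc) := by
    intro i
    funext acc j
    by_cases h : chS shape i j = '.' <;> simp [h]
  have hconv : ((List.range n).flatMap (fun i =>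
        ((List.range m).filter (fun j => chS shape i j ≠ '.')).map (fun j => i*m+j))).foldl
        (cellStepA (n*m)) (st3, (PySem.Set.empty, 0)) =
      (List.range n).foldl (fun acc i =>
        (List.range m).foldl (fun acc j =>
          if chS shape i j = '.' then acc else cellStepA (n*m) acc (i*m+j)) acc)
        (st3, (PySem.Set.empty, 0)) := by
    rw [List.foldl_flatMap]
    simp only [List.foldl_map, List.foldl_filter, hfun]
  rw [← hconv]
  have hcl : ∀ c ∈ (List.range n).flatMap (fun i =>
      ((List.range m).filter (fun j => chS shape i j ≠ '.')).map (fun j => i*m+j)), c < n*m := by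
    intro c hc
    obtain ⟨i, hi, hc2⟩ := List.mem_flatMap.1 hc
    obtain ⟨j, hj, rfl⟩ := List.mem_map.1 hc2
    exact cell_lt (List.mem_range.1 hi) (List.mem_range.1 (List.mem_filter.1 hj).1)
  have hres := count_fold (n*m) lab3 _ [] st3 PySem.Set.empty 0 hcl
    (by intro c hc; cases hc) hG
    (by intro t; constructor
        · intro ht; cases ht
        · rintro ⟨c, hc, _⟩; cases hc)
    (by simp [PySem.Set.ofList])
  rw [hres]
  rw [List.nil_append, List.map_flatMap]
  simp only [List.map_map, Function.comp_def]

-- ===== VERDICT (by name: the statement is the Claim_ definition above) =====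
set_option maxHeartbeats 4000000 in
theorem solution_function_name_spec : Claim_equal_solution_function_name := by
  intro shape _ hpre
  unfold Spec_solution_function_name
  obtain ⟨hne, hm1, hrows⟩ := hpre
  have hn1 : 0 < shape.length := List.length_pos_iff.2 hne
  have hm1' : 0 < (shape.getD 0 "").length := by
    cases shape with
    | nil => exact absurd rfl hne
    | cons a l => simpa [← String.length_toList] using hm1
  simp only [solution_function_name, solution_function_name_alt]
  set n := shape.length with hn
  set m := (shape.getD 0 "").length with hm
  refine final_count shape n m _ _ ?_
  -- phase 3 (left/right borders of the top and bottom rows)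
  refine fold_par (GInv (n*m)) _ _ (List.range m) (fun st lab j hj hG => ?_) _ _ ?_
  · rw [List.mem_range] at hj
    try dsimp only
    have hjn : j < n * m := by
      calc j < m := hj
        _ = 1 * m := (one_mul m).symm
        _ ≤ n * m := Nat.mul_le_mul_right m hn1
    have hGa : GInv (n*m)
        (if chS shape 0 j = 'l' then unionA st j (n*m) else st)
        (if chS shape 0 j = 'l' then mergeB lab j (n*m) else lab) := by
      by_cases h1 : chS shape 0 j = 'l'
      · rw [if_pos h1, if_pos h1]
        exact union_merge_step hG hjn (le_refl _)
      · rw [if_neg h1, if_neg h1]; exact hG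
    by_cases h2 : chS shape (n-1) j = 'r'
    · rw [if_pos h2, if_pos h2]
      exact union_merge_step hGa (cell_lt (by omega) hj) (le_refl _)
    · rw [if_neg h2, if_neg h2]; exact hGa
  -- phase 2 (left/right borders of each row)
  refine fold_par (GInv (n*m)) _ _ (List.range n) (fun st lab i hi hG => ?_) _ _ ?_
  · rw [List.mem_range] at hi
    try dsimp only
    have hGa : GInv (n*m)
        (if chS shape i 0 = 'l' then unionA st (i*m) (n*m) else st)
        (if chS shape i 0 = 'l' then mergeB lab (i*m) (n*m) else lab) := by
      by_cases h1 : chS shape i 0 = 'l'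
      · rw [if_pos h1, if_pos h1]
        exact union_merge_step hG (by have := cell_lt (j := 0) hi hm1'; omega) (le_refl _)
      · rw [if_neg h1, if_neg h1]; exact hG
    by_cases h2 : chS shape i (m-1) = 'r'
    · rw [if_pos h2, if_pos h2]
      exact union_merge_step hGa (cell_lt hi (by omega)) (le_refl _)
    · rw [if_neg h2, if_neg h2]; exact hGa
  -- phase 1 (same-character neighbours)
  refine fold_par (GInv (n*m)) _ _ (List.range n) (fun st lab i hi hG => ?_) _ _ (ginv_init (n*m))
  rw [List.mem_range] at hi
  refine fold_par (GInv (n*m)) _ _ (List.range m) (fun st lab j hj hG => ?_) _ _ hG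
  rw [List.mem_range] at hj
  try dsimp only
  by_cases hch : chS shape i j = '.'
  · rw [if_pos hch, if_pos hch]; exact hG
  · rw [if_neg hch, if_neg hch]
    simp only [List.foldl_cons, List.foldl_nil]
    try dsimp only
    simp only [Nat.add_zero]
    have hc1 : (i < n ∧ j + 1 < m ∧ chS shape i (j+1) = chS shape i j) ↔
        (j + 1 < m ∧ chS shape i (j+1) = chS shape i j) := by
      constructor
      · rintro ⟨_, h⟩; exact h
      · intro h; exact ⟨hi, h⟩
    have hc2 : (i + 1 < n ∧ j < m ∧ chS shape (i+1) j = chS shape i j) ↔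
        (i + 1 < n ∧ chS shape (i+1) j = chS shape i j) := by
      constructor
      · rintro ⟨h1, _, h2⟩; exact ⟨h1, h2⟩
      · rintro ⟨h1, h2⟩; exact ⟨h1, hj, h2⟩
    rw [if_congr hc1 rfl rfl, if_congr hc2 rfl rfl]
    have hGmid : GInv (n*m)
        (if j + 1 < m ∧ chS shape i (j+1) = chS shape i j then
          unionA st (i*m+j) (i*m+(j+1)) else st)
        (if j + 1 < m ∧ chS shape i (j+1) = chS shape i j then
          mergeB lab (i*m+j) (i*m+(j+1)) else lab) := by
      by_cases h1 : j + 1 < m ∧ chS shape i (j+1) = chS shape i j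
      · rw [if_pos h1, if_pos h1]
        exact union_merge_step hG (cell_lt hi hj) (le_of_lt (cell_lt hi h1.1))
      · rw [if_neg h1, if_neg h1]; exact hG
    by_cases h2 : i + 1 < n ∧ chS shape (i+1) j = chS shape i j
    · rw [if_pos h2, if_pos h2]
      exact union_merge_step hGmid (cell_lt hi hj) (le_of_lt (cell_lt h2.1 hj))
    · rw [if_neg h2, if_neg h2]; exact hGmid
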